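-- pv_equiv track=rewrite | github.com/mbalos16/leetcode | smallest_even_multiple.py | smallestEvenMultiple
-- ===== SOURCE A (Python) =====
-- def smallestEvenMultiple(n: int) -> int:
--     no_integer = True
--     i = 1
--     while no_integer:
--         if i % 2 == 0 and i % n == 0:
--             no_integer = True
--             return i
--         i+=1
-- ===== SOURCE B (Python) =====
-- def smallestEvenMultiple(n: int) -> int:
--     m = abs(n)
--     return m if m % 2 == 0 else 2 * m
-- ===== Notes on version B (the rewrite author's own statement) =====
-- stated objective: faster
-- what changed: replaced the linear search over i = 1,2,... for the first common multiple of 2 and n by the closed form lcm(2,|n|) = |n| if |n| is even else 2|n|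
-- outside the precondition, e.g. on smallestEvenMultiple(0): A raises ZeroDivisionError, B returns 0
import Mathlib
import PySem

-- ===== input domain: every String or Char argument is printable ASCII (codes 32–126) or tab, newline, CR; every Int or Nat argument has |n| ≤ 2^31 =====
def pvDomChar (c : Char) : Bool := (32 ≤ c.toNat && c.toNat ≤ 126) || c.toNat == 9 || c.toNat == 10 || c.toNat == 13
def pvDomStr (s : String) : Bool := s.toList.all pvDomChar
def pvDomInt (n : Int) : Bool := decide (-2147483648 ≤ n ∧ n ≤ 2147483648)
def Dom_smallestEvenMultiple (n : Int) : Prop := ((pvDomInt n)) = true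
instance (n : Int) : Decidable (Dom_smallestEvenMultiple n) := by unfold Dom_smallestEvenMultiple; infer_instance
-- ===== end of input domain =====

-- B replaces A's linear search for the first common multiple of 2 and n by the
-- closed form lcm(2,|n|) = |n| if |n| even else 2|n|  (objective: faster, O(1) vs O(|n|)).


-- ===== PORT A =====
-- A's while-loop, fuel-bounded (the loop terminates within 2|n| steps for n ≠ 0;
-- none = fuel exhausted, never reached under Pre_).
def semLoop (n : Int) : Nat → Int → Option Int
  | 0, _ => none
  | fuel+1, i =>
    if PySem.Int.mod i 2 = 0 ∧ PySem.Int.mod i n = 0 then some i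
    else semLoop n fuel (i+1)

def smallestEvenMultiple (n : Int) : Int :=
  (semLoop n (2 * n.natAbs + 2) 1).getD 0

-- ===== PORT B =====
def smallestEvenMultiple_alt (n : Int) : Int :=
  let m := |n|
  if PySem.Int.mod m 2 = 0 then m else 2 * m

-- ===== PRECONDITION & SPEC =====
-- Pre_ excludes exactly n = 0, where A raises ZeroDivisionError (i % 0).
def Pre_smallestEvenMultiple (n : Int) : Prop := n ≠ 0
instance (n : Int) : Decidable (Pre_smallestEvenMultiple n) := by unfold Pre_smallestEvenMultiple; infer_instance
def pvWitness_smallestEvenMultiple : Int := 3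

def Spec_smallestEvenMultiple (n : Int) (out : Int) : Prop := out = smallestEvenMultiple_alt n
instance (n : Int) (out : Int) : Decidable (Spec_smallestEvenMultiple n out) := by unfold Spec_smallestEvenMultiple; infer_instance

-- ===== CLAIM (what is proved, stated in full; the proofs are below) =====
def Claim_equal_smallestEvenMultiple : Prop := ∀ (n : Int), Dom_smallestEvenMultiple n → Pre_smallestEvenMultiple n → Spec_smallestEvenMultiple n (smallestEvenMultiple n)

-- ===== LEMMAS AND PROOFS =====

lemma alt_def (n : Int) :
    smallestEvenMultiple_alt n = if PySem.Int.mod |n| 2 = 0 then |n| else 2 * |n| := rfl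

-- B's value is positive, and it divides exactly the common multiples of 2 and n.
lemma alt_pos (n : Int) (hn : n ≠ 0) : 0 < smallestEvenMultiple_alt n := by
  rw [alt_def]
  have h : 0 < |n| := abs_pos.mpr hn
  split <;> omega

lemma alt_cond (n : Int) (hn : n ≠ 0) :
    PySem.Int.mod (smallestEvenMultiple_alt n) 2 = 0 ∧
    PySem.Int.mod (smallestEvenMultiple_alt n) n = 0 := by
  rw [alt_def]
  simp only [PySem.Int.mod_eq_zero_iff_dvd]
  have hdvd : n ∣ |n| := (dvd_abs n n).mpr dvd_rfl
  split
  · rename_i h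
    exact ⟨h, hdvd⟩
  · exact ⟨Dvd.intro |n| rfl, hdvd.mul_left 2⟩

lemma alt_dvd_of_cond (n i : Int) (hn : n ≠ 0)
    (h2 : PySem.Int.mod i 2 = 0) (hni : PySem.Int.mod i n = 0) :
    smallestEvenMultiple_alt n ∣ i := by
  rw [PySem.Int.mod_eq_zero_iff_dvd] at h2 hni
  have habs : |n| ∣ i := (abs_dvd n i).mpr hni
  rw [alt_def]
  split
  · exact habs
  · rename_i h
    rw [PySem.Int.mod_eq_zero_iff_dvd] at h
    have hcop : IsCoprime (2 : Int) |n| := by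
      rw [Int.isCoprime_iff_gcd_eq_one]
      have hodd : n.natAbs % 2 = 1 := by
        rcases Nat.mod_two_eq_zero_or_one n.natAbs with h0 | h1
        · exfalso; apply h
          have : (2 : Int) ∣ (n.natAbs : Int) := by
            exact_mod_cast (Nat.dvd_of_mod_eq_zero h0)
          rwa [Int.abs_eq_natAbs]
        · exact h1
      show Nat.gcd (2 : Int).natAbs (|n|).natAbs = 1
      rw [Int.natAbs_abs]
      exact Nat.coprime_two_left.mpr (Nat.odd_iff.mpr hodd)
    exact hcop.mul_dvd h2 habs

-- loop invariant: starting at 1 ≤ i ≤ m with enough fuel, the loop returns m = alt n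
lemma semLoop_eq (n : Int) (hn : n ≠ 0) :
    ∀ (fuel : Nat) (i : Int), 1 ≤ i → i ≤ smallestEvenMultiple_alt n →
      (smallestEvenMultiple_alt n - i).toNat < fuel →
      semLoop n fuel i = some (smallestEvenMultiple_alt n) := by
  intro fuel
  induction fuel with
  | zero => intro i _ _ hf; omega
  | succ f ih =>
    intro i hi1 him hf
    rw [semLoop]
    split
    · rename_i hcond
      have hd := alt_dvd_of_cond n i hn hcond.1 hcond.2
      have := Int.le_of_dvd (by omega) hd
      have : i = smallestEvenMultiple_alt n := by omega
      simp [this]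
    · rename_i hcond
      have hne : i ≠ smallestEvenMultiple_alt n := by
        intro h; exact hcond (h ▸ alt_cond n hn)
      exact ih (i+1) (by omega) (by omega) (by omega)

lemma alt_le (n : Int) : smallestEvenMultiple_alt n ≤ 2 * n.natAbs := by
  rw [alt_def]
  have : |n| = (n.natAbs : Int) := Int.abs_eq_natAbs n
  split <;> omega

-- ===== VERDICT (by name: the statement is the Claim_ definition above) =====
theorem smallestEvenMultiple_spec : Claim_equal_smallestEvenMultiple := by
  intro n _ hn
  unfold Spec_smallestEvenMultiple smallestEvenMultiple
  rw [semLoop_eq n hn (2 * n.natAbs + 2) 1 (by omega) (alt_pos n hn)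
        (by have := alt_le n; omega)]
  rfl
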